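-- pv_equiv track=rewrite | github.com/imamulanan/Artificial-Intelligence-Lab | Masud Sir/8_queens.py | best_neighbor
-- ===== SOURCE A (Python) =====
-- def heuristic(state):
--     """Number of attacking pairs of queens. Lower is better. 0 is solution."""
--     n = len(state)
--     attacks = 0
--     for i in range(n):
--         for j in range(i + 1, n):
--             if state[i] == state[j] or abs(state[i] - state[j]) == abs(i - j):
--                 attacks += 1
--     return attacks
--
-- def best_neighbor(state):
--     """Return (best_state, best_h, move_row, move_col) among neighbors by moving each row's queen."""
--     n = len(state)
--     current_h = heuristic(state)
--     best_h = current_h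
--     best_state = None
--     best_move = None
--
--     for row in range(n):
--         original_col = state[row]
--         for col in range(n):
--             if col == original_col:
--                 continue
--             new_state = state.copy()
--             new_state[row] = col
--             h = heuristic(new_state)
--             if h < best_h:
--                 best_h = h
--                 best_state = new_state
--                 best_move = (row, col)
--             # if equal heuristics are also useful for sideways moves; but best_neighbor returns strict best (<)
--     return best_state, best_h, best_move
-- ===== SOURCE B (Python) =====
-- def best_neighbor(state):
--     n = len(state)
--     # value of each queen's column, ascending diagonal and descending diagonal
--     d1 = [state[j] - j for j in range(n)]
--     d2 = [state[j] + j for j in range(n)]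
--
--     # conflict count of a queen notionally at (r, col) against all other rows' queens:
--     # a queen in row j != r attacks (r, col) iff it shares its column, its ascending
--     # diagonal or its descending diagonal, and those three cases are mutually exclusive;
--     # the three counts each include row r's own slot exactly when state[r] == col.
--     def conflicts(r, col):
--         return (state.count(col) + d1.count(col - r) + d2.count(col + r)
--                 - 3 * (state[r] == col))
--
--     conf = [conflicts(r, state[r]) for r in range(n)]
--     current_h = sum(conf) // 2   # every attacking pair is counted from both ends
--
--     best_h = current_h
--     best_state = None
--     best_move = None
--     for row in range(n):
--         base = current_h - conf[row]
--         for col in range(n):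
--             if col == state[row]:
--                 continue
--             h = base + conflicts(row, col)
--             if h < best_h:
--                 best_h = h
--                 best_state = state.copy()
--                 best_state[row] = col
--                 best_move = (row, col)
--     return best_state, best_h, best_move
-- ===== Notes on version B (the rewrite author's own statement) =====
-- stated objective: faster
-- what changed: Instead of recomputing the full O(n^2) pairwise heuristic for each of the n^2 neighbors, B precomputes per-queen column/diagonal values and conflict counts once and evaluates every neighbor incrementally as current_h - conf[row] + conflicts(row, col), where conflicts is three list.count lookups on the column and two diagonal value lists.
import Mathlib
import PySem

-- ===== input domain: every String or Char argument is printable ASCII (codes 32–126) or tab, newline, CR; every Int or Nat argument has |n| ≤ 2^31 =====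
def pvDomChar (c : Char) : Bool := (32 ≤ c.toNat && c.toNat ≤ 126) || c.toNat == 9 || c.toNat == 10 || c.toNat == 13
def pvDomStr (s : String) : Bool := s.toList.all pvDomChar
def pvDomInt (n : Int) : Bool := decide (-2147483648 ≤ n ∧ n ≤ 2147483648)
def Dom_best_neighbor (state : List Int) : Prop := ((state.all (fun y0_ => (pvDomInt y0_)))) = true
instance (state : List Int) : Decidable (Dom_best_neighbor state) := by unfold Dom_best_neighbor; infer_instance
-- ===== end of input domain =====

-- B replaces A's full pairwise-heuristic recomputation per neighbor by an incremental
-- evaluation from precomputed per-queen conflict counts (objective: faster).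

-- ===== PORT A =====
def heuristic (state : List Int) : Int :=
  let n := PySem.List.len state
  (PySem.List.pyRange 0 n 1).foldl (fun attacks i =>
    (PySem.List.pyRange (i + 1) n 1).foldl (fun attacks j =>
      if PySem.List.pyGetD state i 0 == PySem.List.pyGetD state j 0
         || |PySem.List.pyGetD state i 0 - PySem.List.pyGetD state j 0| == |i - j|
      then attacks + 1 else attacks) attacks) 0

def best_neighbor (state : List Int) : Option (List Int) × Int × (Option (Int × Int)) :=
  let n := PySem.List.len state
  let current_h := heuristic state
  (PySem.List.pyRange 0 n 1).foldl (fun acc row =>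
    let original_col := PySem.List.pyGetD state row 0
    (PySem.List.pyRange 0 n 1).foldl (fun acc col =>
      if col == original_col then acc
      else
        let new_state := PySem.List.pySetD state row col
        let h := heuristic new_state
        if h < acc.2.1 then (some new_state, h, some (row, col)) else acc) acc)
    (none, current_h, none)

-- ===== PORT B =====
def bn_conflicts (state d1 d2 : List Int) (r col : Int) : Int :=
  (PySem.List.count state col : Int) + (PySem.List.count d1 (col - r) : Int)
    + (PySem.List.count d2 (col + r) : Int)
    - 3 * (if PySem.List.pyGetD state r 0 == col then 1 else 0)

def best_neighbor_alt (state : List Int) : Option (List Int) × Int × (Option (Int × Int)) :=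
  let n := PySem.List.len state
  let d1 := (PySem.List.pyRange 0 n 1).map (fun j => PySem.List.pyGetD state j 0 - j)
  let d2 := (PySem.List.pyRange 0 n 1).map (fun j => PySem.List.pyGetD state j 0 + j)
  let conf := (PySem.List.pyRange 0 n 1).map (fun r =>
    bn_conflicts state d1 d2 r (PySem.List.pyGetD state r 0))
  let current_h := PySem.Int.floordiv conf.sum 2
  (PySem.List.pyRange 0 n 1).foldl (fun acc row =>
    let base := current_h - PySem.List.pyGetD conf row 0
    (PySem.List.pyRange 0 n 1).foldl (fun acc col =>
      if col == PySem.List.pyGetD state row 0 then acc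
      else
        let h := base + bn_conflicts state d1 d2 row col
        if h < acc.2.1 then (some (PySem.List.pySetD state row col), h, some (row, col)) else acc) acc)
    (none, current_h, none)

-- ===== PRECONDITION & SPEC =====
def Spec_best_neighbor (state : List Int) (out : Option (List Int) × Int × (Option (Int × Int))) : Prop := out = best_neighbor_alt state
instance (state : List Int) (out : Option (List Int) × Int × (Option (Int × Int))) : Decidable (Spec_best_neighbor state out) := by unfold Spec_best_neighbor; infer_instance

-- ===== CLAIM (what is proved, stated in full; the proofs are below) =====
def Claim_equal_best_neighbor : Prop := ∀ (state : List Int), Dom_best_neighbor state → Spec_best_neighbor state (best_neighbor state)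

-- ===== LEMMAS AND PROOFS =====

-- the pairwise attack test of A's heuristic, as a named predicate (proof helper)
def bn_attacks (c1 r1 c2 r2 : Int) : Bool :=
  c1 == c2 || |c1 - c2| == |r1 - r2|

-- indicator of an attacking pair between rows i and j of S
def pvF (S : List Int) (i j : Nat) : Int :=
  if bn_attacks (S.getD i 0) i (S.getD j 0) j then 1 else 0

-- indicator of an attack between a queen notionally at (r, c) and row j's queen of S
def pvFc (S : List Int) (r : Nat) (c : Int) (j : Nat) : Int :=
  if bn_attacks c r (S.getD j 0) j then 1 else 0

-- triangular pair sum, its part avoiding row r, and the full row-r sum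
def pvTri (n : Nat) (F : Nat → Nat → Int) : Int :=
  ∑ i ∈ Finset.range n, ∑ j ∈ Finset.Ico (i + 1) n, F i j

def pvTriOff (n r : Nat) (F : Nat → Nat → Int) : Int :=
  ∑ i ∈ Finset.range n, ∑ j ∈ Finset.Ico (i + 1) n, if i ≠ r ∧ j ≠ r then F i j else 0

def pvRow (n r : Nat) (F : Nat → Nat → Int) : Int :=
  ∑ j ∈ Finset.range n, if j ≠ r then F r j else 0

lemma bn_attacks_symm (c1 r1 c2 r2 : Int) : bn_attacks c1 r1 c2 r2 = bn_attacks c2 r2 c1 r1 := by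
  unfold bn_attacks
  rw [abs_sub_comm c1 c2, abs_sub_comm r1 r2]
  congr 1
  simp [eq_comm]

lemma pvF_symm (S : List Int) (i j : Nat) : pvF S i j = pvF S j i := by
  unfold pvF; rw [bn_attacks_symm]

lemma pvTriOff_eq (n r : Nat) (F : Nat → Nat → Int) :
    pvTriOff n r F = pvTri n (fun i j => if i ≠ r ∧ j ≠ r then F i j else 0) := rfl

lemma pvTri_succ (n : Nat) (F : Nat → Nat → Int) :
    pvTri (n + 1) F = pvTri n F + ∑ i ∈ Finset.range n, F i n := by
  unfold pvTri
  rw [Finset.sum_range_succ]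
  simp only [Finset.Ico_self, Finset.sum_empty, add_zero]
  rw [← Finset.sum_add_distrib]
  refine Finset.sum_congr rfl fun i hi => ?_
  exact Finset.sum_Ico_succ_top (by have := Finset.mem_range.mp hi; omega) _

lemma pvTri_plus_row (F : Nat → Nat → Int) (hsym : ∀ i j, F i j = F j i) :
    ∀ (n r : Nat), r < n → pvTri n F = pvTriOff n r F + pvRow n r F := by
  intro n
  induction n with
  | zero => intro r hr; omega
  | succ n ih =>
    intro r hr
    rw [pvTri_succ, pvTriOff_eq, pvTri_succ, ← pvTriOff_eq]
    unfold pvRow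
    rw [Finset.sum_range_succ]
    by_cases h : r = n
    · subst h
      have h1 : pvTriOff r r F = pvTri r F := by
        unfold pvTriOff pvTri
        refine Finset.sum_congr rfl fun i hi => Finset.sum_congr rfl fun j hj => ?_
        have hi' := Finset.mem_range.mp hi
        have hj' := (Finset.mem_Ico.mp hj).2
        rw [if_pos ⟨by omega, by omega⟩]
      have h3 : (∑ j ∈ Finset.range r, if j ≠ r then F r j else 0)
          = ∑ i ∈ Finset.range r, F i r := by
        refine Finset.sum_congr rfl fun j hj => ?_
        have := Finset.mem_range.mp hj
        rw [if_pos (by omega), hsym]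
      rw [h1, h3]
      simp
    · have hrn : r < n := by omega
      rw [ih r hrn]
      have h2 : (∑ i ∈ Finset.range n, if i ≠ r ∧ n ≠ r then F i n else 0)
          = ∑ i ∈ Finset.range n, if i ≠ r then F i n else 0 := by
        refine Finset.sum_congr rfl fun i hi => ?_
        by_cases hir : i = r
        · subst hir; rw [if_neg (by tauto), if_neg (by tauto)]
        · rw [if_pos ⟨hir, by omega⟩, if_pos hir]
      have h4 : (∑ i ∈ Finset.range n, F i n)
          = (∑ i ∈ Finset.range n, if i ≠ r then F i n else 0) + F r n := by
        have := Finset.sum_ite_eq' (Finset.range n) r (fun i => F i n)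
        rw [if_pos (Finset.mem_range.mpr hrn)] at this
        calc (∑ i ∈ Finset.range n, F i n)
            = ∑ i ∈ Finset.range n,
                ((if i ≠ r then F i n else 0) + (if i = r then F i n else 0)) := by
              refine Finset.sum_congr rfl fun i _ => ?_
              by_cases hir : i = r
              · subst hir; simp
              · simp [hir]
          _ = (∑ i ∈ Finset.range n, if i ≠ r then F i n else 0)
                + ∑ i ∈ Finset.range n, (if i = r then F i n else 0) := by
              rw [Finset.sum_add_distrib]
          _ = _ := by rw [this]
      rw [h2, h4, if_pos (by omega : n ≠ r)]
      simp only [pvRow]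
      ring
  
lemma pvHandshake (F : Nat → Nat → Int) (hsym : ∀ i j, F i j = F j i) (n : Nat) :
    (∑ r ∈ Finset.range n, pvRow n r F) = 2 * pvTri n F := by
  induction n with
  | zero => simp [pvTri, pvRow]
  | succ n ih =>
    rw [Finset.sum_range_succ, pvTri_succ]
    have hlast : pvRow (n + 1) n F = ∑ j ∈ Finset.range n, F n j := by
      unfold pvRow
      rw [Finset.sum_range_succ, if_neg (by omega), add_zero]
      refine Finset.sum_congr rfl fun j hj => ?_
      have := Finset.mem_range.mp hj
      rw [if_pos (by omega)]
    have hstep : (∑ r ∈ Finset.range n, pvRow (n + 1) r F)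
        = (∑ r ∈ Finset.range n, pvRow n r F) + ∑ r ∈ Finset.range n, F r n := by
      rw [← Finset.sum_add_distrib]
      refine Finset.sum_congr rfl fun r hr => ?_
      have := Finset.mem_range.mp hr
      unfold pvRow
      rw [Finset.sum_range_succ, if_pos (by omega : n ≠ r), hsym]
    have hsymsum : (∑ j ∈ Finset.range n, F n j) = ∑ j ∈ Finset.range n, F j n :=
      Finset.sum_congr rfl fun j _ => hsym n j
    rw [hstep, hlast, ih, hsymsum]
    ring

lemma pvSum_map_range (n : Nat) (f : Nat → Int) :
    ((List.range n).map f).sum = ∑ i ∈ Finset.range n, f i := by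
  induction n with
  | zero => simp
  | succ n ih =>
    rw [List.range_succ, List.map_append, List.sum_append, Finset.sum_range_succ, ih]
    simp

lemma pvCount_range (n : Nat) (q : Nat → Bool) :
    (((List.range n).countP q : Nat) : Int) = ∑ t ∈ Finset.range n, if q t then (1 : Int) else 0 := by
  rw [← PySem.List.sum_map_ite_one_zero q (List.range n), pvSum_map_range]

lemma pvCount_pyRange (a b : Nat) (p : Int → Bool) :
    ((List.countP p (PySem.List.pyRange (a : Int) (b : Int) 1) : Nat) : Int)
      = ∑ j ∈ Finset.Ico a b, if p (j : Int) then (1 : Int) else 0 := by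
  rw [PySem.List.pyRange_one, List.countP_map, pvCount_range, Finset.sum_Ico_eq_sum_range]
  have ht : ((b : Int) - (a : Int)).toNat = b - a := by omega
  rw [ht]
  refine Finset.sum_congr rfl fun t _ => ?_
  simp only [Function.comp_def, Nat.cast_add]
  rfl

-- bridge: A's heuristic is the triangular pair sum
lemma heuristic_eq (S : List Int) : heuristic S = pvTri S.length (pvF S) := by
  unfold heuristic
  simp only [PySem.List.len_eq, PySem.List.foldl_if_add_one, PySem.List.foldl_add, zero_add]
  rw [PySem.List.pyRange_one, List.map_map]
  have ht : ((S.length : Int) - 0).toNat = S.length := by omega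
  rw [ht, pvSum_map_range]
  refine Finset.sum_congr rfl fun i hi => ?_
  simp only [Function.comp, zero_add]
  have hcast : ((i : Int) + 1) = ((i + 1 : Nat) : Int) := by push_cast; ring
  rw [hcast, pvCount_pyRange (i + 1) S.length]
  refine Finset.sum_congr rfl fun j hj => ?_
  simp [pvF, bn_attacks]

-- bridge: Python's list.count as a positional indicator sum
lemma pvCount_self (S : List Int) (c : Int) :
    ((PySem.List.count S c : Nat) : Int)
      = ∑ j ∈ Finset.range S.length, if S.getD j 0 = c then 1 else 0 := by
  induction S with
  | nil => simp [PySem.List.count]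
  | cons x T ih =>
    have hc : PySem.List.count (x :: T) c
        = PySem.List.count T c + if (x == c) then 1 else 0 := by
      simp [PySem.List.count, List.count_cons]
    rw [List.length_cons, Finset.sum_range_succ', hc]
    push_cast
    rw [ih]
    simp only [List.getD_cons_succ, List.getD_cons_zero, beq_iff_eq]

lemma pvCount_map_pyRange (f : Int → Int) (n : Nat) (k : Int) :
    ((PySem.List.count ((PySem.List.pyRange 0 (n : Int) 1).map f) k : Nat) : Int)
      = ∑ t ∈ Finset.range n, if f (t : Int) = k then 1 else 0 := by
  have hcp : PySem.List.count ((PySem.List.pyRange 0 (n : Int) 1).map f) k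
      = List.countP (fun x => x == k) ((PySem.List.pyRange 0 (n : Int) 1).map f) := by
    simp [PySem.List.count, List.count_eq_countP]
  rw [hcp, List.countP_map]
  have h0 : (0 : Int) = ((0 : Nat) : Int) := rfl
  rw [h0, pvCount_pyRange 0 n]
  rw [show Finset.Ico 0 n = Finset.range n from by rw [Finset.range_eq_Ico]]
  refine Finset.sum_congr rfl fun t _ => ?_
  simp [Function.comp, beq_iff_eq]

-- the attack indicator against (r, c) split into column / diagonal indicators
lemma pvFc_split (S : List Int) (r j : Nat) (c : Int) :
    (if j ≠ r then pvFc S r c j else 0)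
      = ((if S.getD j 0 = c then (1 : Int) else 0)
          + (if S.getD j 0 - (j : Int) = c - (r : Int) then 1 else 0)
          + (if S.getD j 0 + (j : Int) = c + (r : Int) then 1 else 0))
        - (if j = r then 3 * (if S.getD r 0 = c then 1 else 0) else 0) := by
  by_cases h : j = r
  · subst h
    rw [if_neg (by omega), if_pos rfl]
    split_ifs <;> omega
  · rw [if_pos h, if_neg h, sub_zero]
    unfold pvFc bn_attacks
    simp only [Bool.or_eq_true, beq_iff_eq, abs_eq_abs]
    have hne : (j : Int) ≠ (r : Int) := fun hh => h (by exact_mod_cast hh)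
    split_ifs <;> omega

-- bridge: B's conflicts function is the full row-r sum of attack indicators
lemma bn_conflicts_eq (S : List Int) (r : Nat) (c : Int) (hr : r < S.length) :
    bn_conflicts S
      ((PySem.List.pyRange 0 (S.length : Int) 1).map (fun j => PySem.List.pyGetD S j 0 - j))
      ((PySem.List.pyRange 0 (S.length : Int) 1).map (fun j => PySem.List.pyGetD S j 0 + j))
      (r : Int) c
      = ∑ j ∈ Finset.range S.length, if j ≠ r then pvFc S r c j else 0 := by
  unfold bn_conflicts
  rw [pvCount_self, pvCount_map_pyRange, pvCount_map_pyRange, PySem.List.pyGetD_natCast]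
  have hsplit : (∑ j ∈ Finset.range S.length, if j ≠ r then pvFc S r c j else 0)
      = ∑ j ∈ Finset.range S.length,
          (((if S.getD j 0 = c then (1 : Int) else 0)
            + (if S.getD j 0 - (j : Int) = c - (r : Int) then 1 else 0)
            + (if S.getD j 0 + (j : Int) = c + (r : Int) then 1 else 0))
           - (if j = r then 3 * (if S.getD r 0 = c then 1 else 0) else 0)) :=
    Finset.sum_congr rfl fun j _ => pvFc_split S r j c
  rw [hsplit, Finset.sum_sub_distrib, Finset.sum_add_distrib, Finset.sum_add_distrib,
      Finset.sum_ite_eq' (Finset.range S.length) r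
        (fun _ => 3 * (if S.getD r 0 = c then (1 : Int) else 0)),
      if_pos (Finset.mem_range.mpr hr)]
  have e1 : (∑ t ∈ Finset.range S.length,
        if PySem.List.pyGetD S (t : Int) 0 - (t : Int) = c - (r : Int) then (1 : Int) else 0)
      = ∑ t ∈ Finset.range S.length,
          if S.getD t 0 - (t : Int) = c - (r : Int) then (1 : Int) else 0 :=
    Finset.sum_congr rfl fun t _ => by rw [PySem.List.pyGetD_natCast]
  have e2 : (∑ t ∈ Finset.range S.length,
        if PySem.List.pyGetD S (t : Int) 0 + (t : Int) = c + (r : Int) then (1 : Int) else 0)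
      = ∑ t ∈ Finset.range S.length,
          if S.getD t 0 + (t : Int) = c + (r : Int) then (1 : Int) else 0 :=
    Finset.sum_congr rfl fun t _ => by rw [PySem.List.pyGetD_natCast]
  rw [e1, e2]
  simp only [beq_iff_eq]

-- the incremental update identity for a single-queen move
lemma heuristic_set (S : List Int) (r : Nat) (hr : r < S.length) (c : Int) :
    heuristic (S.set r c)
      = heuristic S
        - (∑ j ∈ Finset.range S.length, if j ≠ r then pvFc S r (S.getD r 0) j else 0)
        + (∑ j ∈ Finset.range S.length, if j ≠ r then pvFc S r c j else 0) := by
  have hlen : (S.set r c).length = S.length := by simp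
  rw [heuristic_eq, heuristic_eq, hlen]
  rw [pvTri_plus_row (pvF (S.set r c)) (pvF_symm _) S.length r hr,
      pvTri_plus_row (pvF S) (pvF_symm _) S.length r hr]
  have hoff : pvTriOff S.length r (pvF (S.set r c)) = pvTriOff S.length r (pvF S) := by
    unfold pvTriOff
    refine Finset.sum_congr rfl fun i _ => Finset.sum_congr rfl fun j _ => ?_
    by_cases h : i ≠ r ∧ j ≠ r
    · rw [if_pos h, if_pos h]
      unfold pvF
      rw [List.getD_eq_getElem?_getD, List.getElem?_set_ne (by omega : r ≠ i),
          List.getD_eq_getElem?_getD (l := S.set r c),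
          List.getElem?_set_ne (by omega : r ≠ j),
          ← List.getD_eq_getElem?_getD, ← List.getD_eq_getElem?_getD]
    · rw [if_neg h, if_neg h]
  have hrow1 : pvRow S.length r (pvF (S.set r c))
      = ∑ j ∈ Finset.range S.length, if j ≠ r then pvFc S r c j else 0 := by
    unfold pvRow
    refine Finset.sum_congr rfl fun j _ => ?_
    by_cases h : j ≠ r
    · rw [if_pos h, if_pos h]
      unfold pvF pvFc
      have e1 : (S.set r c).getD r 0 = c := by
        rw [List.getD_eq_getElem?_getD, List.getElem?_set_self hr]; rfl
      have e2 : (S.set r c).getD j 0 = S.getD j 0 := by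
        rw [List.getD_eq_getElem?_getD, List.getElem?_set_ne (by omega : r ≠ j),
            ← List.getD_eq_getElem?_getD]
      rw [e1, e2]
    · rw [if_neg h, if_neg h]
  have hrow2 : pvRow S.length r (pvF S)
      = ∑ j ∈ Finset.range S.length, if j ≠ r then pvFc S r (S.getD r 0) j else 0 := rfl
  rw [hoff, hrow1, hrow2]
  ring

-- B's current_h equals A's heuristic (handshake: the conflict list sums to twice the pair count)
lemma pvConf_sum_eq (S : List Int) :
    PySem.Int.floordiv (((PySem.List.pyRange 0 (S.length : Int) 1).map (fun r =>
      bn_conflicts S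
        ((PySem.List.pyRange 0 (S.length : Int) 1).map (fun j => PySem.List.pyGetD S j 0 - j))
        ((PySem.List.pyRange 0 (S.length : Int) 1).map (fun j => PySem.List.pyGetD S j 0 + j))
        r (PySem.List.pyGetD S r 0))).sum) 2 = heuristic S := by
  have hsum : ((PySem.List.pyRange 0 (S.length : Int) 1).map (fun r =>
      bn_conflicts S
        ((PySem.List.pyRange 0 (S.length : Int) 1).map (fun j => PySem.List.pyGetD S j 0 - j))
        ((PySem.List.pyRange 0 (S.length : Int) 1).map (fun j => PySem.List.pyGetD S j 0 + j))
        r (PySem.List.pyGetD S r 0))).sum = 2 * heuristic S := by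
    set D1 := (PySem.List.pyRange 0 (S.length : Int) 1).map
      (fun j => PySem.List.pyGetD S j 0 - j) with hD1
    set D2 := (PySem.List.pyRange 0 (S.length : Int) 1).map
      (fun j => PySem.List.pyGetD S j 0 + j) with hD2
    rw [PySem.List.pyRange_one, List.map_map]
    have ht : ((S.length : Int) - 0).toNat = S.length := by omega
    rw [ht, pvSum_map_range, heuristic_eq, ← pvHandshake (pvF S) (pvF_symm S) S.length]
    refine Finset.sum_congr rfl fun r hr => ?_
    have hrn : r < S.length := Finset.mem_range.mp hr
    simp only [Function.comp, zero_add]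
    rw [PySem.List.pyGetD_natCast, hD1, hD2, bn_conflicts_eq S r _ hrn]
    rfl
  rw [hsum, PySem.Int.floordiv_eq_ediv_of_pos (by norm_num),
      Int.mul_ediv_cancel_left _ (by norm_num)]

-- the incremental evaluation used by B equals A's recomputed heuristic of the modified state
lemma pvH_step (S : List Int) (r : Nat) (hrn : r < S.length) (col : Int) :
    heuristic S
      - bn_conflicts S
          ((PySem.List.pyRange 0 (S.length : Int) 1).map (fun j => PySem.List.pyGetD S j 0 - j))
          ((PySem.List.pyRange 0 (S.length : Int) 1).map (fun j => PySem.List.pyGetD S j 0 + j))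
          (r : Int) (PySem.List.pyGetD S (r : Int) 0)
      + bn_conflicts S
          ((PySem.List.pyRange 0 (S.length : Int) 1).map (fun j => PySem.List.pyGetD S j 0 - j))
          ((PySem.List.pyRange 0 (S.length : Int) 1).map (fun j => PySem.List.pyGetD S j 0 + j))
          (r : Int) col
      = heuristic (PySem.List.pySetD S (r : Int) col) := by
  rw [PySem.List.pySetD_natCast, PySem.List.pyGetD_natCast,
      bn_conflicts_eq S r _ hrn, bn_conflicts_eq S r _ hrn,
      heuristic_set S r hrn col]

-- ===== VERDICT (by name: the statement is the Claim_ definition above) =====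
theorem best_neighbor_spec : Claim_equal_best_neighbor := by
  intro S _
  unfold Spec_best_neighbor
  show best_neighbor S = best_neighbor_alt S
  simp only [best_neighbor, best_neighbor_alt, PySem.List.len_eq]
  rw [pvConf_sum_eq]
  refine PySem.List.foldl_congr_mem' _ _ _ _ ?_
  intro row hrow acc
  obtain ⟨hrow0, hrow1⟩ := PySem.List.mem_pyRange_one.mp hrow
  lift row to Nat using hrow0 with r
  have hrn : r < S.length := by exact_mod_cast hrow1
  refine PySem.List.foldl_congr_mem' _ _ _ _ ?_
  intro col _ acc2
  by_cases hg : (col == PySem.List.pyGetD S (r : Int) 0) = true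
  · rw [if_pos hg, if_pos hg]
  · rw [if_neg hg, if_neg hg]
    have hget : PySem.List.pyGetD ((PySem.List.pyRange 0 (S.length : Int) 1).map (fun x =>
        bn_conflicts S
          ((PySem.List.pyRange 0 (S.length : Int) 1).map (fun j => PySem.List.pyGetD S j 0 - j))
          ((PySem.List.pyRange 0 (S.length : Int) 1).map (fun j => PySem.List.pyGetD S j 0 + j))
          x (PySem.List.pyGetD S x 0))) (r : Int) 0
        = bn_conflicts S
            ((PySem.List.pyRange 0 (S.length : Int) 1).map (fun j => PySem.List.pyGetD S j 0 - j))
            ((PySem.List.pyRange 0 (S.length : Int) 1).map (fun j => PySem.List.pyGetD S j 0 + j))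
            (r : Int) (PySem.List.pyGetD S (r : Int) 0) :=
      PySem.List.pyGetD_map_pyRange _ S.length r 0 hrn
    rw [hget, pvH_step S r hrn col]
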